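-- pv_equiv track=rewrite | github.com/formicag/clarity-timesheet-ocr-app | src/utils.py | is_valid_project_code
-- ===== SOURCE A (Python) =====
-- def is_valid_project_code(project_code: str) -> bool:
--     """
--     Check if a project code is valid.
--
--     Valid project codes are:
--     - PJ followed by 6 digits (e.g., PJ025043)
--     - REAG followed by 6 digits (e.g., REAG042910)
--     - HCST followed by digits (e.g., HCST314980)
--     - NTC5 followed by digits (e.g., NTC5124690)
--     - Other letter prefixes followed by digits (flexible for future codes)
--
--     Invalid patterns (subtask labels):
--     - Pure words like DESIGN, LABOUR, TESTING
--     - Anything without digits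
--
--     Args:
--         project_code: Project code to validate
--
--     Returns:
--         True if valid, False otherwise
--     """
--     if not project_code or len(project_code) < 3:
--         return False
--
--     code = project_code.upper().strip()
--
--     # Must contain at least one digit (project codes have numbers)
--     if not any(c.isdigit() or c in 'OIL' for c in code):  # OIL are OCR errors for 0,1,1
--         return False
--
--     # Reject pure words (subtask labels)
--     if code.isalpha():
--         return False
--
--     # Check common valid patterns
--     # Pattern 1: PJ + 6 digits
--     if code.startswith('PJ') and len(code) >= 8:
--         return True
--
--     # Pattern 2: REAG + 6 digits
--     if code.startswith('REAG') and len(code) >= 10: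
--         return True
--
--     # Pattern 3: HCST + digits
--     if code.startswith('HCST') and len(code) >= 8:
--         return True
--
--     # Pattern 4: NTC5 + digits
--     if code.startswith('NTC5') and len(code) >= 8:
--         return True
--
--     # Pattern 5: Other letter prefix + digits (e.g., SCR1476, PR12345)
--     # Must start with letters, then have digits
--     has_letter_prefix = False
--     has_digits = False
--     for i, c in enumerate(code):
--         if i == 0 and not c.isalpha():
--             return False  # Must start with letter
--         if c.isalpha():
--             has_letter_prefix = True
--         elif c.isdigit() or c in 'OIL':
--             has_digits = True
--
--     return has_letter_prefix and has_digits
-- ===== SOURCE B (Python) =====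
-- def is_valid_project_code(project_code: str) -> bool:
--     if len(project_code) < 3:
--         return False
--     code = project_code.upper().strip()
--     if not code or code.isalpha() or not code[0].isalpha():
--         return False
--     if not any(c.isdigit() or c in 'OIL' for c in code):
--         return False
--     if any(c.isdigit() for c in code):
--         return True
--     # no real digit: only the known prefixes (with OCR letters O/I/L as digits) are accepted
--     if code.startswith('REAG'):
--         return len(code) >= 10
--     return (code.startswith('PJ') or code.startswith('HCST') or code.startswith('NTC5')) and len(code) >= 8
-- ===== Notes on version B (the rewrite author's own statement) =====
-- stated objective: simpler
-- what changed: B replaces A's four-branch prefix cascade plus flag-accumulating enumerate loop with guard clauses, an any(real-digit) fast path, and a single prefix fallback used only in the rare no-real-digit case; the per-character work moves into C-level any() generators.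
import Mathlib
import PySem

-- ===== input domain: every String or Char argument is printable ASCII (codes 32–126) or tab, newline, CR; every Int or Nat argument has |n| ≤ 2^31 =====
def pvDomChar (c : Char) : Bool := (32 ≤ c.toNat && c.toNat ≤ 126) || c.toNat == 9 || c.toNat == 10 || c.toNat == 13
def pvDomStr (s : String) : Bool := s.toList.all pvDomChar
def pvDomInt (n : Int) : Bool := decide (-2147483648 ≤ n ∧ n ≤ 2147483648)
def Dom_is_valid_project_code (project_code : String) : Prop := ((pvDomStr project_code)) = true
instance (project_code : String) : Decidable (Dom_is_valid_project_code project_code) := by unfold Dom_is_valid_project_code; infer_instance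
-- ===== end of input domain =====

-- B replaces A's prefix cascade + flag-accumulating enumerate loop by guard clauses, an
-- any(real-digit) fast path and a prefix fallback only for the rare no-digit case (objective: simpler).


-- ===== PORT A =====
-- the `for i, c in enumerate(code)` loop: `first` is `i == 0`, flags threaded as in A
def pvLoopA : Bool → List Char → Bool → Bool → Bool
  | _, [], has_letter_prefix, has_digits => has_letter_prefix && has_digits
  | first, c :: rest, has_letter_prefix, has_digits =>
    if first && !(PySem.Chars.isalpha c) then false
    else if PySem.Chars.isalpha c then pvLoopA false rest true has_digits
    else if PySem.Chars.isdigit c || c == 'O' || c == 'I' || c == 'L' then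
      pvLoopA false rest has_letter_prefix true
    else pvLoopA false rest has_letter_prefix has_digits

def is_valid_project_code (project_code : String) : Bool :=
  if project_code.toList == [] || PySem.Str.len project_code < 3 then false
  else
    let code := PySem.Str.strip (PySem.Str.upper project_code)
    if !(code.toList.any (fun c => PySem.Chars.isdigit c || c == 'O' || c == 'I' || c == 'L')) then
      false
    else if PySem.Str.strIsalpha code then false
    else if PySem.Str.startswith code "PJ" && 8 ≤ PySem.Str.len code then true
    else if PySem.Str.startswith code "REAG" && 10 ≤ PySem.Str.len code then true
    else if PySem.Str.startswith code "HCST" && 8 ≤ PySem.Str.len code then true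
    else if PySem.Str.startswith code "NTC5" && 8 ≤ PySem.Str.len code then true
    else pvLoopA true code.toList false false

-- ===== PORT B =====
def is_valid_project_code_alt (project_code : String) : Bool :=
  if PySem.Str.len project_code < 3 then false
  else
    let code := PySem.Str.strip (PySem.Str.upper project_code)
    match code.toList with                                   -- `not code or … code[0] …`
    | [] => false
    | c :: _ =>
      if PySem.Str.strIsalpha code || !(PySem.Chars.isalpha c) then false
      else if !(code.toList.any (fun c => PySem.Chars.isdigit c || c == 'O' || c == 'I' || c == 'L')) then
        false
      else if code.toList.any (fun c => PySem.Chars.isdigit c) then true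
      else if PySem.Str.startswith code "REAG" then 10 ≤ PySem.Str.len code
      else (PySem.Str.startswith code "PJ" || PySem.Str.startswith code "HCST"
            || PySem.Str.startswith code "NTC5") && 8 ≤ PySem.Str.len code

-- ===== PRECONDITION & SPEC =====
def Spec_is_valid_project_code (project_code : String) (out : Bool) : Prop := out = is_valid_project_code_alt project_code
instance (project_code : String) (out : Bool) : Decidable (Spec_is_valid_project_code project_code out) := by unfold Spec_is_valid_project_code; infer_instance

-- ===== CLAIM (what is proved, stated in full; the proofs are below) =====
def Claim_equal_is_valid_project_code : Prop := ∀ (project_code : String), Dom_is_valid_project_code project_code → Spec_is_valid_project_code project_code (is_valid_project_code project_code)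

-- ===== LEMMAS AND PROOFS =====

-- a character that is not a letter but counts as "digit-ish" (digit or OCR letter O/I/L) is a real digit
lemma pv_digitish_not_alpha (c : Char) :
    (!(PySem.Chars.isalpha c) && (PySem.Chars.isdigit c || c == 'O' || c == 'I' || c == 'L'))
      = PySem.Chars.isdigit c := by
  by_cases hd : PySem.Chars.isdigit c
  · have : PySem.Chars.isalpha c = false := by
      have h0 : ('0'.val.toNat) = 48 := by decide
      have h9 : ('9'.val.toNat) = 57 := by decide
      have hA : ('A'.val.toNat) = 65 := by decide
      have hZ : ('Z'.val.toNat) = 90 := by decide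
      have ha : ('a'.val.toNat) = 97 := by decide
      have hz : ('z'.val.toNat) = 122 := by decide
      simp only [PySem.Chars.isdigit, PySem.Chars.isalpha, PySem.Chars.isupper,
        PySem.Chars.islower, Char.le_def, UInt32.le_iff_toNat_le, decide_eq_true_eq,
        Bool.and_eq_true, Bool.or_eq_false_iff, Bool.and_eq_false_iff,
        decide_eq_false_iff_not, not_le, h0, h9, hA, hZ, ha, hz] at hd ⊢
      omega
    simp [this, hd]
  · rcases hO : (c == 'O' || c == 'I' || c == 'L') with _ | _
    · simp [hd, hO]
    · have : PySem.Chars.isalpha c = true := by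
        rcases Bool.or_eq_true_iff.mp hO with h | h
        · rcases Bool.or_eq_true_iff.mp h with h | h <;>
            · rw [beq_iff_eq.mp h]; decide
        · rw [beq_iff_eq.mp h]; decide
      simp [this, hd]

-- a letter is never a digit
lemma pv_alpha_not_digit (c : Char) (ha : PySem.Chars.isalpha c = true) :
    PySem.Chars.isdigit c = false := by
  rw [← pv_digitish_not_alpha]; simp [ha]

-- after index 0, A's loop just accumulates "some letter seen" and "some real digit seen"
lemma pvLoopA_false (l : List Char) (hl hd : Bool) :
    pvLoopA false l hl hd
      = ((hl || l.any PySem.Chars.isalpha) && (hd || l.any PySem.Chars.isdigit)) := by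
  induction l generalizing hl hd with
  | nil => simp [pvLoopA]
  | cons c rest ih =>
    by_cases ha : PySem.Chars.isalpha c
    · have hcd := pv_alpha_not_digit c ha
      simp [pvLoopA, ha, ih, hcd]
    · simp only [Bool.not_eq_true] at ha
      by_cases hdd : (PySem.Chars.isdigit c || c == 'O' || c == 'I' || c == 'L') = true
      · have hcd : PySem.Chars.isdigit c = true := by
          rw [← pv_digitish_not_alpha]; simp [ha, hdd]
        simp [pvLoopA, ha, ih, hcd]
      · have hcd : PySem.Chars.isdigit c = false := by
          rw [← pv_digitish_not_alpha]; simp [ha]; simpa using hdd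
        have hO : (c == 'O' || c == 'I' || c == 'L') = false := by
          simpa [hcd] using (Bool.not_eq_true _ |>.mp hdd)
        simp [pvLoopA, ha, hO, hcd, ih]

-- a prefix starting with a letter forces the head to be that letter
lemma pv_startswith_head (c : Char) (rest : List Char) (d : Char) (p : List Char)
    (h : PySem.Chars.startswith (c :: rest) (d :: p) = true) : c = d := by
  rcases List.cons_prefix_cons.mp ((PySem.Chars.startswith_iff _ _).mp h) with ⟨h1, _⟩
  exact h1.symm

lemma pv_startswith_false_of_head (c : Char) (rest : List Char) (d : Char) (p : List Char)
    (hne : c ≠ d) : PySem.Chars.startswith (c :: rest) (d :: p) = false := by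
  rcases h : PySem.Chars.startswith (c :: rest) (d :: p) with _ | _
  · rfl
  · exact absurd (pv_startswith_head c rest d p h) hne

-- core: the two post-guard bodies agree on every character list `l`
lemma pv_body_eq_chars (l : List Char) :
    (if !(l.any (fun c => PySem.Chars.isdigit c || c == 'O' || c == 'I' || c == 'L')) then
      false
    else if PySem.Chars.strIsalpha l then false
    else if PySem.Chars.startswith l ['P', 'J'] && decide (8 ≤ (l.length : Int)) then true
    else if PySem.Chars.startswith l ['R', 'E', 'A', 'G'] && decide (10 ≤ (l.length : Int)) then true
    else if PySem.Chars.startswith l ['H', 'C', 'S', 'T'] && decide (8 ≤ (l.length : Int)) then true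
    else if PySem.Chars.startswith l ['N', 'T', 'C', '5'] && decide (8 ≤ (l.length : Int)) then true
    else pvLoopA true l false false)
    = (match l with
    | [] => false
    | c :: _ =>
      if PySem.Chars.strIsalpha l || !(PySem.Chars.isalpha c) then false
      else if !(l.any (fun c => PySem.Chars.isdigit c || c == 'O' || c == 'I' || c == 'L')) then
        false
      else if l.any (fun c => PySem.Chars.isdigit c) then true
      else if PySem.Chars.startswith l ['R', 'E', 'A', 'G'] then decide (10 ≤ (l.length : Int))
      else (PySem.Chars.startswith l ['P', 'J'] || PySem.Chars.startswith l ['H', 'C', 'S', 'T']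
            || PySem.Chars.startswith l ['N', 'T', 'C', '5']) && decide (8 ≤ (l.length : Int))) := by
  rcases l with _ | ⟨c, rest⟩
  · simp
  · by_cases ha : PySem.Chars.isalpha c = true
    · have hcd := pv_alpha_not_digit c ha
      by_cases hA : PySem.Chars.strIsalpha (c :: rest) = true
      · simp [hA]
      · by_cases hdig : ((c :: rest).any fun c =>
            PySem.Chars.isdigit c || c == 'O' || c == 'I' || c == 'L') = true
        · by_cases hrd : ((c :: rest).any PySem.Chars.isdigit) = true
          · -- a real digit is present: every remaining branch of A answers true, and so does B
            have hrdrest : rest.any PySem.Chars.isdigit = true := by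
              simpa [hcd] using hrd
            have hloop : pvLoopA true (c :: rest) false false = true := by
              simp [pvLoopA, ha, pvLoopA_false, hrdrest]
            simp only [hA, ha, hdig, hrd, hloop, Bool.false_or, Bool.not_true, if_true]
            split_ifs <;> rfl
          · -- no real digit: A falls through its cascade with a false loop; B takes its prefix fallback
            have hrdrest : rest.any PySem.Chars.isdigit = false := by
              simpa [hcd] using hrd
            have hloop : pvLoopA true (c :: rest) false false = false := by
              simp [pvLoopA, ha, pvLoopA_false, hrdrest]
            by_cases hre : PySem.Chars.startswith (c :: rest) ['R', 'E', 'A', 'G'] = true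
            · have hc : c = 'R' := pv_startswith_head _ _ _ _ hre
              have hpj := pv_startswith_false_of_head c rest 'P' ['J'] (by rw [hc]; decide)
              have hhc := pv_startswith_false_of_head c rest 'H' ['C', 'S', 'T'] (by rw [hc]; decide)
              have hnt := pv_startswith_false_of_head c rest 'N' ['T', 'C', '5'] (by rw [hc]; decide)
              simp [hA, ha, hdig, hrd, hre, hpj, hhc, hnt, hloop]
            · by_cases hpj : PySem.Chars.startswith (c :: rest) ['P', 'J'] = true
              · have hc : c = 'P' := pv_startswith_head _ _ _ _ hpj
                have hhc := pv_startswith_false_of_head c rest 'H' ['C', 'S', 'T'] (by rw [hc]; decide)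
                have hnt := pv_startswith_false_of_head c rest 'N' ['T', 'C', '5'] (by rw [hc]; decide)
                simp [hA, ha, hdig, hrd, hre, hpj, hhc, hnt, hloop]
              · by_cases hhc : PySem.Chars.startswith (c :: rest) ['H', 'C', 'S', 'T'] = true
                · have hc : c = 'H' := pv_startswith_head _ _ _ _ hhc
                  have hnt := pv_startswith_false_of_head c rest 'N' ['T', 'C', '5'] (by rw [hc]; decide)
                  simp [hA, ha, hdig, hrd, hre, hpj, hhc, hnt, hloop]
                · by_cases hnt : PySem.Chars.startswith (c :: rest) ['N', 'T', 'C', '5'] = true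
                  · simp [hA, ha, hdig, hrd, hre, hpj, hhc, hnt, hloop]
                  · simp [hA, ha, hdig, hrd, hre, hpj, hhc, hnt, hloop]
        · -- no digit-ish character at all: both sides answer false
          simp [hdig, hA, ha]
    · -- head is not a letter: B rejects at once; A's patterns cannot match and its loop rejects
      simp only [Bool.not_eq_true] at ha
      have hpj := pv_startswith_false_of_head c rest 'P' ['J'] (by rintro rfl; exact absurd ha (by decide))
      have hre := pv_startswith_false_of_head c rest 'R' ['E', 'A', 'G'] (by rintro rfl; exact absurd ha (by decide))
      have hhc := pv_startswith_false_of_head c rest 'H' ['C', 'S', 'T'] (by rintro rfl; exact absurd ha (by decide))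
      have hnt := pv_startswith_false_of_head c rest 'N' ['T', 'C', '5'] (by rintro rfl; exact absurd ha (by decide))
      have hloop : pvLoopA true (c :: rest) false false = false := by
        simp [pvLoopA, ha]
      simp [ha, hpj, hre, hhc, hnt, hloop]

-- ===== VERDICT =====
theorem is_valid_project_code_spec : Claim_equal_is_valid_project_code := by
  intro s _
  unfold Spec_is_valid_project_code is_valid_project_code is_valid_project_code_alt
  by_cases hlen : PySem.Str.len s < 3
  · have h1 : (s.toList == [] || decide (PySem.Str.len s < 3)) = true := by
      simp only [hlen, decide_true, Bool.or_true]
    simp only [h1, if_pos hlen, reduceIte]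
  · have h1 : (s.toList == [] || decide (PySem.Str.len s < 3)) = false := by
      have hne : (s.toList == []) = false := by
        rcases h : s.toList with _ | _
        · rw [PySem.Str.len_eq, h] at hlen; simp at hlen
        · simp
      simp only [hne, hlen, decide_false, Bool.or_false]
    simp only [h1, if_neg hlen, Bool.false_eq_true, if_false]
    simp only [PySem.Str.strIsalpha_eq, PySem.Str.startswith_eq, PySem.Str.len_eq,
      PySem.Str.toList_strip, PySem.Str.toList_upper]
    rcases hL : PySem.Chars.strip (PySem.Chars.upper s.toList) with _ | ⟨c, rest⟩
    · simp
    · simpa using pv_body_eq_chars (c :: rest)
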